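-- pv_equiv track=rewrite | github.com/MAO3J1m0Op/cs232-final | rhythm.py | fill_gap
-- ===== SOURCE A (Python) =====
-- from typing import List, Tuple
--
-- def choose_note(note_length: int, subdiv_names: List[Tuple[str, int]]) -> Tuple[str, int]:
--     """Choses the best note out of the list of notes provided
--
--     Args:
--         note_length (int): the length of the note, in subdivisions
--         subdiv_names (List[Tuple[str, int]]): a list of notes pairing their name
--         and their length
--
--     Returns:
--         Tuple[str, int]: the name and length of the chosen note, or (None, 0) if
--         no note was able to be chosen.
--     """
--     for name, subdiv in subdiv_names:
--         if note_length >= subdiv: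
--             return name, subdiv
--
--     return None, 0
--
-- def fill_gap(gap_length: int, note_length: int) -> List[str]:
--     """Fills a gap containing a MIDI note with notes
--
--     Args:
--         gap_length (int): the length, in subdivisions, of the distance between
--         this MIDI note and the next
--         note_length (int): the duration of this MIDI note in subdivisions
--
--     Returns:
--         List[str]: a list of notes that completely fills this gap
--     """
--
--     notes = []
--
--     rest_length = gap_length - note_length
--
--     names_and_subdivs = [
--         ('whole',        32),
--         ('half',         16),
--         ('quarter',       8),
--         ('eighth',        4),
--         ('sixteenth',     2),
--         ('thirty-second', 1)
--     ]
--
--     # Get the first note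
--     first_note_name, first_note_subdiv = choose_note(note_length, names_and_subdivs)
--     if first_note_name is not None:
--         notes.append(first_note_name + '_note')
--         note_length -= first_note_subdiv
--
--     # Add the remainder of the note tied together
--     while True:
--         name, subdiv = choose_note(note_length, names_and_subdivs)
--         if name is None:
--             break
--
--         notes.append(name + '_tie')
--         note_length -= subdiv
--
--     # Add the rest
--     while True:
--         name, subdiv = choose_note(rest_length, names_and_subdivs)
--         if name is None:
--             break
--
--         notes.append(name + '_rest')
--         rest_length -= subdiv
--
--     return notes
-- ===== SOURCE B (Python) =====
-- from typing import List
--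
-- _NAMES = [('half', 16), ('quarter', 8), ('eighth', 4), ('sixteenth', 2), ('thirty-second', 1)]
--
-- def _decompose(length: int) -> List[str]:
--     """Note names of the greedy decomposition, computed arithmetically:
--     wholes by floor division, the sub-whole part by binary bit tests."""
--     if length <= 0:
--         return []
--     out = ['whole'] * (length // 32)
--     r = length % 32
--     for name, v in _NAMES:
--         if r % (2 * v) >= v:
--             out.append(name)
--     return out
--
-- def fill_gap(gap_length: int, note_length: int) -> List[str]:
--     note_names = _decompose(note_length)
--     rest_names = _decompose(gap_length - note_length)
--     notes = ([note_names[0] + '_note'] + [n + '_tie' for n in note_names[1:]]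
--              if note_names else [])
--     return notes + [n + '_rest' for n in rest_names]
-- ===== Notes on version B (the rewrite author's own statement) =====
-- stated objective: simpler
-- what changed: Replaces A's repeated greedy scans of the note table (choose a note, subtract, rescan) by direct arithmetic: wholes via one floor division and the sub-whole part via binary bit tests on length % 32, then suffixes the names in a single assembly step.
import Mathlib
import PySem

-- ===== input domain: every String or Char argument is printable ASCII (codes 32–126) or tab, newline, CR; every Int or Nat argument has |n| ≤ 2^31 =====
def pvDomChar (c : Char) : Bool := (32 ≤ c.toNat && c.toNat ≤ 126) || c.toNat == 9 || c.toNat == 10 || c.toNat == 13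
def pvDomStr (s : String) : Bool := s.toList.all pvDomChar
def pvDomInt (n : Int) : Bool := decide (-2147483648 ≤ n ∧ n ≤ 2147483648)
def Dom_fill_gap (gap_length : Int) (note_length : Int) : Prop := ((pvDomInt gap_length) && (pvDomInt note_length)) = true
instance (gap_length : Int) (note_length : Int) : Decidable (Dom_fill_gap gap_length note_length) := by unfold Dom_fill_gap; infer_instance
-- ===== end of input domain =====

-- B replaces A's repeated greedy list scans by direct arithmetic (floor division for wholes,
-- binary bit tests for the sub-whole part); objective: simpler, no measured speed claim.

-- ===== PORT A =====
def namesAndSubdivs : List (String × Int) :=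
  [("whole", 32), ("half", 16), ("quarter", 8), ("eighth", 4), ("sixteenth", 2), ("thirty-second", 1)]

def choose_note (note_length : Int) (subdiv_names : List (String × Int)) : Option String × Int :=
  match subdiv_names with
  | [] => (none, 0)
  | (name, subdiv) :: rest =>
      if note_length ≥ subdiv then (some name, subdiv) else choose_note note_length rest

-- termination fact for A's while-loops (cited by fillLoop's decreasing_by)
theorem choose_note_sound (L : Int) (name : String) (subdiv : Int)
    (h : choose_note L namesAndSubdivs = (some name, subdiv)) : 1 ≤ subdiv ∧ subdiv ≤ L := by
  simp only [namesAndSubdivs, choose_note] at h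
  split_ifs at h <;> simp_all <;> omega

-- A's `while True: choose / break / append / subtract` loop, with the suffix appended to each name
def fillLoop (L : Int) (suffix : String) : List String :=
  match h : choose_note L namesAndSubdivs with
  | (none, _) => []
  | (some name, subdiv) => (name ++ suffix) :: fillLoop (L - subdiv) suffix
termination_by L.toNat
decreasing_by
  have := choose_note_sound L name subdiv h
  omega

def fill_gap (gap_length : Int) (note_length : Int) : List String :=
  let rest_length := gap_length - note_length
  match choose_note note_length namesAndSubdivs with
  | (none, _) => fillLoop note_length "_tie" ++ fillLoop rest_length "_rest"
  | (some first_note_name, first_note_subdiv) =>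
      (first_note_name ++ "_note") ::
        (fillLoop (note_length - first_note_subdiv) "_tie" ++ fillLoop rest_length "_rest")

-- ===== PORT B =====
def bNames : List (String × Int) :=
  [("half", 16), ("quarter", 8), ("eighth", 4), ("sixteenth", 2), ("thirty-second", 1)]

def decompose (length : Int) : List String :=
  if length ≤ 0 then []
  else
    List.replicate (PySem.Int.floordiv length 32).toNat "whole" ++
      bNames.filterMap (fun p =>
        if PySem.Int.mod (PySem.Int.mod length 32) (2 * p.2) ≥ p.2 then some p.1 else none)

def fill_gap_alt (gap_length : Int) (note_length : Int) : List String :=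
  let note_names := decompose note_length
  let rest_names := decompose (gap_length - note_length)
  let notes := match note_names with
    | [] => []
    | f :: rest => (f ++ "_note") :: rest.map (fun s => s ++ "_tie")
  notes ++ rest_names.map (fun s => s ++ "_rest")

-- ===== PRECONDITION & SPEC =====
def Spec_fill_gap (gap_length : Int) (note_length : Int) (out : List String) : Prop := out = fill_gap_alt gap_length note_length
instance (gap_length : Int) (note_length : Int) (out : List String) : Decidable (Spec_fill_gap gap_length note_length out) := by unfold Spec_fill_gap; infer_instance

-- ===== CLAIM (what is proved, stated in full; the proofs are below) =====
def Claim_equal_fill_gap : Prop := ∀ (gap_length : Int) (note_length : Int), Dom_fill_gap gap_length note_length → Spec_fill_gap gap_length note_length (fill_gap gap_length note_length)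

-- ===== LEMMAS AND PROOFS =====

-- normal form of decompose with Lean's ediv/emod (PySem floor ops agree for positive divisors)
def decN (L : Int) : List String :=
  if L ≤ 0 then []
  else
    List.replicate (L / 32).toNat "whole" ++
      ((if L % 32 % 32 ≥ 16 then ["half"] else []) ++
       (if L % 32 % 16 ≥ 8 then ["quarter"] else []) ++
       (if L % 32 % 8 ≥ 4 then ["eighth"] else []) ++
       (if L % 32 % 4 ≥ 2 then ["sixteenth"] else []) ++
       (if L % 32 % 2 ≥ 1 then ["thirty-second"] else []))

theorem decompose_eq_decN (L : Int) : decompose L = decN L := by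
  simp [decompose, decN, bNames, List.filterMap,
    PySem.Int.mod_eq_emod_of_pos (show (0:Int) < 32 by norm_num),
    PySem.Int.mod_eq_emod_of_pos (show (0:Int) < 16 by norm_num),
    PySem.Int.mod_eq_emod_of_pos (show (0:Int) < 8 by norm_num),
    PySem.Int.mod_eq_emod_of_pos (show (0:Int) < 4 by norm_num),
    PySem.Int.mod_eq_emod_of_pos (show (0:Int) < 2 by norm_num),
    PySem.Int.floordiv_eq_ediv_of_pos (show (0:Int) < 32 by norm_num)]
  split_ifs <;> simp

theorem choose_note_none (L : Int) (k : Int)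
    (h : choose_note L namesAndSubdivs = (none, k)) : L ≤ 0 := by
  simp only [namesAndSubdivs, choose_note] at h
  split_ifs at h <;> simp_all <;> omega

theorem decN_nonpos (L : Int) (h : L ≤ 0) : decN L = [] := by
  simp [decN, h]

theorem decN_step32 (L : Int) (h : 32 ≤ L) : decN L = "whole" :: decN (L - 32) := by
  by_cases h32 : L = 32
  · subst h32; decide
  · have g1 : ¬ (L ≤ 0) := by omega
    have g2 : ¬ (L - 32 ≤ 0) := by omega
    have hr : L % 32 = (L - 32) % 32 := by omega
    have hc : (L / 32).toNat = ((L - 32) / 32).toNat + 1 := by omega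
    rw [decN, decN, if_neg g1, if_neg g2, hr, hc, List.replicate_succ]
    simp

theorem decN_step16 (L : Int) (h1 : 16 ≤ L) (h2 : L < 32) :
    decN L = "half" :: decN (L - 16) := by
  interval_cases L <;> decide

theorem decN_step8 (L : Int) (h1 : 8 ≤ L) (h2 : L < 16) :
    decN L = "quarter" :: decN (L - 8) := by
  interval_cases L <;> decide

theorem decN_step4 (L : Int) (h1 : 4 ≤ L) (h2 : L < 8) :
    decN L = "eighth" :: decN (L - 4) := by
  interval_cases L <;> decide

theorem decN_step2 (L : Int) (h1 : 2 ≤ L) (h2 : L < 4) :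
    decN L = "sixteenth" :: decN (L - 2) := by
  interval_cases L <;> decide

theorem decN_step1 (L : Int) (h1 : 1 ≤ L) (h2 : L < 2) :
    decN L = "thirty-second" :: decN (L - 1) := by
  interval_cases L; decide

theorem decN_step (L : Int) (nm : String) (s : Int)
    (h : choose_note L namesAndSubdivs = (some nm, s)) : decN L = nm :: decN (L - s) := by
  simp only [namesAndSubdivs, choose_note] at h
  split_ifs at h with h1 h2 h3 h4 h5 h6 <;> simp_all
  · obtain ⟨rfl, rfl⟩ := h; exact decN_step32 L (by omega)
  · obtain ⟨rfl, rfl⟩ := h; exact decN_step16 L (by omega) (by omega)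
  · obtain ⟨rfl, rfl⟩ := h; exact decN_step8 L (by omega) (by omega)
  · obtain ⟨rfl, rfl⟩ := h; exact decN_step4 L (by omega) (by omega)
  · obtain ⟨rfl, rfl⟩ := h; exact decN_step2 L (by omega) (by omega)
  · obtain ⟨rfl, rfl⟩ := h; exact decN_step1 L (by omega) (by omega)

theorem fillLoop_eq_aux (n : Nat) : ∀ (L : Int), L.toNat ≤ n → ∀ (suf : String),
    fillLoop L suf = (decN L).map (fun s => s ++ suf) := by
  induction n with
  | zero =>
    intro L hL suf
    have hL0 : L ≤ 0 := by omega
    rw [fillLoop]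
    rcases hc : choose_note L namesAndSubdivs with ⟨o, k⟩
    cases o with
    | none => simp [hc, decN_nonpos L hL0]
    | some nm =>
      have := choose_note_sound L nm k hc
      omega
  | succ n ih =>
    intro L hL suf
    rw [fillLoop]
    rcases hc : choose_note L namesAndSubdivs with ⟨o, k⟩
    cases o with
    | none => simp [hc, decN_nonpos L (choose_note_none L k hc)]
    | some nm =>
      have hs := choose_note_sound L nm k hc
      simp only [hc]
      rw [ih (L - k) (by omega) suf, decN_step L nm k hc]
      simp

theorem fillLoop_eq (L : Int) (suf : String) :
    fillLoop L suf = (decN L).map (fun s => s ++ suf) :=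
  fillLoop_eq_aux L.toNat L (le_refl _) suf

-- ===== VERDICT (by name: the statement is the Claim_ definition above) =====
theorem fill_gap_spec : Claim_equal_fill_gap := by
  intro g n _
  unfold Spec_fill_gap fill_gap fill_gap_alt
  rcases hc : choose_note n namesAndSubdivs with ⟨o, k⟩
  cases o with
  | none => simp [hc, fillLoop_eq, decompose_eq_decN, decN_nonpos n (choose_note_none n k hc)]
  | some nm => simp [hc, fillLoop_eq, decompose_eq_decN, decN_step n nm k hc]
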